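-- pv_equiv track=rewrite | github.com/hkit99394/GridTown-Optimizer | python/cp_sat_solver.py | service_effect_zone
-- ===== SOURCE A (Python) =====
-- def is_allowed(grid, r: int, c: int) -> bool:
--     return 0 <= r < len(grid) and 0 <= c < len(grid[0]) and grid[r][c] == 1
--
-- def service_effect_zone(grid, r: int, c: int, rows: int, cols: int, effect_range: int):
--     h = len(grid)
--     w = len(grid[0])
--     r_min = max(0, r - effect_range)
--     r_max = min(h - 1, r + rows - 1 + effect_range)
--     c_min = max(0, c - effect_range)
--     c_max = min(w - 1, c + cols - 1 + effect_range)
--     zone = []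
--     for rr in range(r_min, r_max + 1):
--         for cc in range(c_min, c_max + 1):
--             in_footprint = r <= rr < r + rows and c <= cc < c + cols
--             if in_footprint:
--                 continue
--             if is_allowed(grid, rr, cc):
--                 zone.append((rr, cc))
--     return zone
-- ===== SOURCE B (Python) =====
-- def is_allowed(grid, r: int, c: int) -> bool:
--     return 0 <= r < len(grid) and 0 <= c < len(grid[0]) and grid[r][c] == 1
--
-- def _segment(grid, rr, c0, c1, zone):
--     """Append the allowed cells (rr, cc) for cc in [c0, c1) to zone."""
--     for cc in range(c0, c1):
--         if is_allowed(grid, rr, cc):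
--             zone.append((rr, cc))
--
-- def service_effect_zone(grid, r: int, c: int, rows: int, cols: int, effect_range: int):
--     h = len(grid)
--     w = len(grid[0])
--     r_min = max(0, r - effect_range)
--     r_max = min(h - 1, r + rows - 1 + effect_range)
--     c_min = max(0, c - effect_range)
--     c_max = min(w - 1, c + cols - 1 + effect_range)
--     r_end = max(r_min, r_max + 1)
--     c_end = max(c_min, c_max + 1)
--     # footprint clipped to the zone: rows [fr0, fr1), cols [fc0, fc1)
--     fr0 = min(max(r, r_min), r_end)
--     fr1 = min(max(r + rows, fr0), r_end)
--     fc0 = min(max(c, c_min), c_end)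
--     fc1 = min(max(c + cols, fc0), c_end)
--     zone = []
--     for rr in range(r_min, fr0):          # full rows above the footprint
--         _segment(grid, rr, c_min, c_end, zone)
--     for rr in range(fr0, fr1):            # footprint rows: left then right segment
--         _segment(grid, rr, c_min, fc0, zone)
--         _segment(grid, rr, fc1, c_end, zone)
--     for rr in range(fr1, r_end):          # full rows below the footprint
--         _segment(grid, rr, c_min, c_end, zone)
--     return zone
-- ===== Notes on version B (the rewrite author's own statement) =====
-- stated objective: alternative
-- what changed: B decomposes zone-minus-footprint into bands (full rows above the footprint, left/right column segments beside it, full rows below), emitted by a shared segment helper, instead of scanning the whole expanded rectangle and skipping footprint cells with a per-cell in_footprint test.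
import Mathlib
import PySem

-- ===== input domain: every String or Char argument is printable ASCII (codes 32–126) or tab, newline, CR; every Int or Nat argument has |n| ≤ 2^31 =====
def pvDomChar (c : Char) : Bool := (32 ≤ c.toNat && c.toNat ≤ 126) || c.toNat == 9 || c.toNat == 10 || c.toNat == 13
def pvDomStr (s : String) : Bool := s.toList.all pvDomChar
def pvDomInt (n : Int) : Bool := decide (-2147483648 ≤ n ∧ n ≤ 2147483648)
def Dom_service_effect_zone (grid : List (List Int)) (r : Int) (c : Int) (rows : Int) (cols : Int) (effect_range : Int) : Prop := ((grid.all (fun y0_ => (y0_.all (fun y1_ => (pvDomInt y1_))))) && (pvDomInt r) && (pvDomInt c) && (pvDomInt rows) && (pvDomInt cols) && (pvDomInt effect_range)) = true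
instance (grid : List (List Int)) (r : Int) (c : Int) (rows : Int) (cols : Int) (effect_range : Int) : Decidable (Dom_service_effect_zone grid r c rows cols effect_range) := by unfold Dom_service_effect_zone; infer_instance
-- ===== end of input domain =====

-- B lists the same allowed cells by decomposing zone-minus-footprint into bands (rows above,
-- left/right segments beside, rows below) instead of a per-cell in_footprint skip test. (objective: alternative)

-- ===== PORT A =====
def is_allowed (grid : List (List Int)) (r : Int) (c : Int) : Bool :=
  decide (0 ≤ r) && decide (r < (grid.length : Int)) &&
  decide (0 ≤ c) && decide (c < ((PySem.List.pyGetD grid 0 []).length : Int)) &&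
  (PySem.List.pyGetD (PySem.List.pyGetD grid r []) c 0 == 1)

def service_effect_zone (grid : List (List Int)) (r : Int) (c : Int) (rows : Int) (cols : Int) (effect_range : Int) : List (Int × Int) :=
  let h : Int := grid.length
  let w : Int := (PySem.List.pyGetD grid 0 []).length
  let r_min := max 0 (r - effect_range)
  let r_max := min (h - 1) (r + rows - 1 + effect_range)
  let c_min := max 0 (c - effect_range)
  let c_max := min (w - 1) (c + cols - 1 + effect_range)
  (PySem.List.pyRange r_min (r_max + 1) 1).foldl (fun zone rr =>
    (PySem.List.pyRange c_min (c_max + 1) 1).foldl (fun zone cc =>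
      if (r ≤ rr ∧ rr < r + rows) ∧ (c ≤ cc ∧ cc < c + cols) then zone
      else if is_allowed grid rr cc then zone ++ [(rr, cc)] else zone) zone) []

-- ===== PORT B =====
-- _segment appends the allowed cells (rr, cc) for cc in [c0, c1) to zone
def sez_segment (grid : List (List Int)) (rr : Int) (c0 : Int) (c1 : Int) (zone : List (Int × Int)) : List (Int × Int) :=
  (PySem.List.pyRange c0 c1 1).foldl (fun zone cc =>
    if is_allowed grid rr cc then zone ++ [(rr, cc)] else zone) zone

def service_effect_zone_alt (grid : List (List Int)) (r : Int) (c : Int) (rows : Int) (cols : Int) (effect_range : Int) : List (Int × Int) :=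
  let h : Int := grid.length
  let w : Int := (PySem.List.pyGetD grid 0 []).length
  let r_min := max 0 (r - effect_range)
  let r_max := min (h - 1) (r + rows - 1 + effect_range)
  let c_min := max 0 (c - effect_range)
  let c_max := min (w - 1) (c + cols - 1 + effect_range)
  let r_end := max r_min (r_max + 1)
  let c_end := max c_min (c_max + 1)
  let fr0 := min (max r r_min) r_end
  let fr1 := min (max (r + rows) fr0) r_end
  let fc0 := min (max c c_min) c_end
  let fc1 := min (max (c + cols) fc0) c_end
  let zone1 := (PySem.List.pyRange r_min fr0 1).foldl (fun zone rr =>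
    sez_segment grid rr c_min c_end zone) []
  let zone2 := (PySem.List.pyRange fr0 fr1 1).foldl (fun zone rr =>
    sez_segment grid rr fc1 c_end (sez_segment grid rr c_min fc0 zone)) zone1
  (PySem.List.pyRange fr1 r_end 1).foldl (fun zone rr =>
    sez_segment grid rr c_min c_end zone) zone2

-- ===== PRECONDITION & SPEC =====
-- Pre_ excludes exactly the inputs on which A raises IndexError: the empty grid (len(grid[0])),
-- and ragged grids where some zone cell outside the footprint lies past the end of its
-- (shorter-than-row-0) row, so grid[rr][cc] is out of range.
def Pre_service_effect_zone (grid : List (List Int)) (r : Int) (c : Int) (rows : Int) (cols : Int) (effect_range : Int) : Prop :=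
  grid ≠ [] ∧
  ∀ rr ∈ PySem.List.pyRange (max 0 (r - effect_range)) (min ((grid.length : Int) - 1) (r + rows - 1 + effect_range) + 1) 1,
    ∀ cc ∈ PySem.List.pyRange (max 0 (c - effect_range)) (min (((PySem.List.pyGetD grid 0 []).length : Int) - 1) (c + cols - 1 + effect_range) + 1) 1,
      ¬((r ≤ rr ∧ rr < r + rows) ∧ (c ≤ cc ∧ cc < c + cols)) →
      cc < ((PySem.List.pyGetD grid rr []).length : Int)
instance (grid : List (List Int)) (r : Int) (c : Int) (rows : Int) (cols : Int) (effect_range : Int) : Decidable (Pre_service_effect_zone grid r c rows cols effect_range) := by unfold Pre_service_effect_zone; infer_instance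

def pvWitness_service_effect_zone : List (List Int) × Int × Int × Int × Int × Int :=
  ([[1, 0, 1], [1, 1, 1], [0, 1, 1]], 1, 1, 1, 1, 1)

def Spec_service_effect_zone (grid : List (List Int)) (r : Int) (c : Int) (rows : Int) (cols : Int) (effect_range : Int) (out : List (Int × Int)) : Prop := out = service_effect_zone_alt grid r c rows cols effect_range
instance (grid : List (List Int)) (r : Int) (c : Int) (rows : Int) (cols : Int) (effect_range : Int) (out : List (Int × Int)) : Decidable (Spec_service_effect_zone grid r c rows cols effect_range out) := by unfold Spec_service_effect_zone; infer_instance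

-- ===== CLAIM (what is proved, stated in full; the proofs are below) =====
def Claim_equal_service_effect_zone : Prop := ∀ (grid : List (List Int)) (r : Int) (c : Int) (rows : Int) (cols : Int) (effect_range : Int), Dom_service_effect_zone grid r c rows cols effect_range → Pre_service_effect_zone grid r c rows cols effect_range → Spec_service_effect_zone grid r c rows cols effect_range (service_effect_zone grid r c rows cols effect_range)

-- ===== LEMMAS AND PROOFS =====
theorem sez_inner_skip (g : Int → Bool) (P : Int → Prop) [DecidablePred P] (a b rr : Int) (z : List (Int × Int)) :
    (PySem.List.pyRange a b 1).foldl
      (fun zone cc => if P cc then zone else if g cc then zone ++ [(rr, cc)] else zone) z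
    = z ++ ((PySem.List.pyRange a b 1).filter (fun cc => !(decide (P cc)) && g cc)).map (fun cc => (rr, cc)) := by
  rw [PySem.List.foldl_congr_mem _ _ (fun zone cc => if (!(decide (P cc)) && g cc) = true then zone ++ [(rr, cc)] else zone) _ ?_]
  · exact PySem.List.foldl_append_if _ _ _ _
  · intro acc x _
    by_cases hP : P x <;> simp [hP]

theorem sez_inner_plain (g : Int → Bool) (a b rr : Int) (z : List (Int × Int)) :
    (PySem.List.pyRange a b 1).foldl (fun zone cc => if g cc then zone ++ [(rr, cc)] else zone) z
    = z ++ ((PySem.List.pyRange a b 1).filter g).map (fun cc => (rr, cc)) :=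
  PySem.List.foldl_append_if _ _ _ _

theorem sez_range_max (a b : Int) : PySem.List.pyRange a b 1 = PySem.List.pyRange a (max a b) 1 := by
  rcases le_total a b with h | h
  · rw [max_eq_right h]
  · rw [max_eq_left h, PySem.List.pyRange_one_eq_nil h, PySem.List.pyRange_one_eq_nil le_rfl]

theorem sez_bands (g : Int → Int → Bool) (r c rows cols rmin rb cmin cb rend cend fr0 fr1 fc0 fc1 : Int)
    (hrend : rend = max rmin rb) (hcend : cend = max cmin cb)
    (hfr0 : fr0 = min (max r rmin) rend) (hfr1 : fr1 = min (max (r + rows) fr0) rend)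
    (hfc0 : fc0 = min (max c cmin) cend) (hfc1 : fc1 = min (max (c + cols) fc0) cend) :
    (PySem.List.pyRange rmin rb 1).foldl (fun zone rr =>
      (PySem.List.pyRange cmin cb 1).foldl (fun zone cc =>
        if (r ≤ rr ∧ rr < r + rows) ∧ (c ≤ cc ∧ cc < c + cols) then zone
        else if g rr cc then zone ++ [(rr, cc)] else zone) zone) []
    =
    (PySem.List.pyRange fr1 rend 1).foldl (fun zone rr =>
      (PySem.List.pyRange cmin cend 1).foldl (fun zone cc =>
        if g rr cc then zone ++ [(rr, cc)] else zone) zone)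
      ((PySem.List.pyRange fr0 fr1 1).foldl (fun zone rr =>
        (PySem.List.pyRange fc1 cend 1).foldl (fun zone cc =>
          if g rr cc then zone ++ [(rr, cc)] else zone)
          ((PySem.List.pyRange cmin fc0 1).foldl (fun zone cc =>
            if g rr cc then zone ++ [(rr, cc)] else zone) zone))
        ((PySem.List.pyRange rmin fr0 1).foldl (fun zone rr =>
          (PySem.List.pyRange cmin cend 1).foldl (fun zone cc =>
            if g rr cc then zone ++ [(rr, cc)] else zone) zone) [])) := by
  -- full-row and segment row builders
  set full : Int → List (Int × Int) :=
    fun rr => ((PySem.List.pyRange cmin cend 1).filter (g rr)).map (fun cc => (rr, cc)) with hfull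
  set lr : Int → List (Int × Int) := fun rr =>
    ((PySem.List.pyRange cmin fc0 1).filter (g rr)).map (fun cc => (rr, cc))
    ++ ((PySem.List.pyRange fc1 cend 1).filter (g rr)).map (fun cc => (rr, cc)) with hlr
  set rowA : Int → List (Int × Int) := fun rr =>
    ((PySem.List.pyRange cmin cb 1).filter
      (fun cc => !(decide ((r ≤ rr ∧ rr < r + rows) ∧ (c ≤ cc ∧ cc < c + cols))) && g rr cc)).map
      (fun cc => (rr, cc)) with hrowA
  -- LHS to flatMap form
  have hL : (PySem.List.pyRange rmin rb 1).foldl (fun zone rr =>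
      (PySem.List.pyRange cmin cb 1).foldl (fun zone cc =>
        if (r ≤ rr ∧ rr < r + rows) ∧ (c ≤ cc ∧ cc < c + cols) then zone
        else if g rr cc then zone ++ [(rr, cc)] else zone) zone) ([] : List (Int × Int))
      = (PySem.List.pyRange rmin rb 1).flatMap rowA := by
    rw [PySem.List.foldl_congr_mem _ _ (fun zone rr => zone ++ rowA rr) _ ?_]
    · rw [PySem.List.foldl_append_eq_flatMap]; simp
    · intro acc rr _
      exact sez_inner_skip (g rr) (fun cc => (r ≤ rr ∧ rr < r + rows) ∧ (c ≤ cc ∧ cc < c + cols)) cmin cb rr acc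
  -- RHS bands to flatMap form
  have hband : ∀ (a b : Int) (z : List (Int × Int)),
      (PySem.List.pyRange a b 1).foldl (fun zone rr =>
        (PySem.List.pyRange cmin cend 1).foldl (fun zone cc =>
          if g rr cc then zone ++ [(rr, cc)] else zone) zone) z
      = z ++ (PySem.List.pyRange a b 1).flatMap full := by
    intro a b z
    rw [PySem.List.foldl_congr_mem _ _ (fun zone rr => zone ++ full rr) _ ?_]
    · exact PySem.List.foldl_append_eq_flatMap _ _ _
    · intro acc rr _; exact sez_inner_plain (g rr) cmin cend rr acc
  have hmid : (PySem.List.pyRange fr0 fr1 1).foldl (fun zone rr =>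
        (PySem.List.pyRange fc1 cend 1).foldl (fun zone cc =>
          if g rr cc then zone ++ [(rr, cc)] else zone)
          ((PySem.List.pyRange cmin fc0 1).foldl (fun zone cc =>
            if g rr cc then zone ++ [(rr, cc)] else zone) zone))
        ((PySem.List.pyRange rmin fr0 1).flatMap full)
      = (PySem.List.pyRange rmin fr0 1).flatMap full ++ (PySem.List.pyRange fr0 fr1 1).flatMap lr := by
    rw [PySem.List.foldl_congr_mem _ _ (fun zone rr => zone ++ lr rr) _ ?_]
    · exact PySem.List.foldl_append_eq_flatMap _ _ _
    · intro acc rr _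
      rw [sez_inner_plain (g rr) cmin fc0 rr acc, sez_inner_plain (g rr) fc1 cend rr _, hlr]
      simp
  rw [hL, hband rmin fr0 []]
  simp only [List.nil_append]
  rw [hmid, hband fr1 rend _]
  -- pure range/filter reasoning
  have h1 : rmin ≤ fr0 := by omega
  have h2 : fr0 ≤ fr1 := by omega
  have h3 : fr1 ≤ rend := by omega
  have hc1 : cmin ≤ fc0 := by omega
  have hc2 : fc0 ≤ fc1 := by omega
  have hc3 : fc1 ≤ cend := by omega
  have hrr : PySem.List.pyRange rmin rb 1 = PySem.List.pyRange rmin rend 1 := by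
    rw [sez_range_max, hrend]
  have hcc : PySem.List.pyRange cmin cb 1 = PySem.List.pyRange cmin cend 1 := by
    rw [sez_range_max, hcend]
  rw [hrr, PySem.List.pyRange_one_append rmin fr1 rend (le_trans h1 h2) h3,
      PySem.List.pyRange_one_append rmin fr0 fr1 h1 h2, List.flatMap_append, List.flatMap_append]
  congr 1
  · congr 1
    · -- top band: rowA = full on rows above footprint
      apply List.flatMap_congr
      intro rr hrr'
      have hb := PySem.List.mem_pyRange_one.mp hrr'
      have hnf : ¬(r ≤ rr ∧ rr < r + rows) := by omega
      simp only [hrowA, hfull, hcc]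
      congr 1
      apply List.filter_congr
      intro cc _
      simp [hnf]
    · -- middle band: rowA = left ++ right on footprint rows
        apply List.flatMap_congr
        intro rr hrr'
        have hb := PySem.List.mem_pyRange_one.mp hrr'
        have hr1 : r ≤ rr := by omega
        have hr2 : rr < r + rows := by omega
        simp only [hrowA, hlr, hcc]
        have hsplit : PySem.List.pyRange cmin cend 1
            = (PySem.List.pyRange cmin fc0 1 ++ PySem.List.pyRange fc0 fc1 1) ++ PySem.List.pyRange fc1 cend 1 := by
          rw [← PySem.List.pyRange_one_append cmin fc0 fc1 hc1 hc2,
              ← PySem.List.pyRange_one_append cmin fc1 cend (le_trans hc1 hc2) hc3]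
        rw [hsplit, List.filter_append, List.filter_append, List.map_append, List.map_append]
        have hmidnil : (PySem.List.pyRange fc0 fc1 1).filter
            (fun cc => !(decide ((r ≤ rr ∧ rr < r + rows) ∧ (c ≤ cc ∧ cc < c + cols))) && g rr cc) = [] := by
          apply List.filter_eq_nil_iff.mpr
          intro cc hcc'
          have hb2 := PySem.List.mem_pyRange_one.mp hcc'
          have hf : c ≤ cc ∧ cc < c + cols := by omega
          simp [hr1, hr2, hf.1, hf.2]
        rw [hmidnil]
        simp only [List.map_nil, List.append_nil]
        congr 2
        · apply List.filter_congr
          intro cc hcc'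
          have hb2 := PySem.List.mem_pyRange_one.mp hcc'
          have hnf : ¬(c ≤ cc ∧ cc < c + cols) := by omega
          simp [hnf]
        · apply List.filter_congr
          intro cc hcc'
          have hb2 := PySem.List.mem_pyRange_one.mp hcc'
          have hnf : ¬(c ≤ cc ∧ cc < c + cols) := by omega
          simp [hnf]
  · -- bottom band
    apply List.flatMap_congr
    intro rr hrr'
    have hb := PySem.List.mem_pyRange_one.mp hrr'
    have hnf : ¬(r ≤ rr ∧ rr < r + rows) := by omega
    simp only [hrowA, hfull, hcc]
    congr 1
    apply List.filter_congr
    intro cc _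
    simp [hnf]

theorem service_effect_zone_eq_alt (grid : List (List Int)) (r : Int) (c : Int) (rows : Int) (cols : Int) (effect_range : Int) :
    service_effect_zone grid r c rows cols effect_range = service_effect_zone_alt grid r c rows cols effect_range := by
  unfold service_effect_zone service_effect_zone_alt sez_segment
  exact sez_bands (is_allowed grid) r c rows cols _ _ _ _ _ _ _ _ _ _ rfl rfl rfl rfl rfl rfl

-- ===== VERDICT (by name: the statement is the Claim_ definition above) =====
theorem service_effect_zone_spec : Claim_equal_service_effect_zone := by
  intro grid r c rows cols effect_range _ _
  exact service_effect_zone_eq_alt grid r c rows cols effect_range
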